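-- pv_equiv track=rewrite | github.com/siriS88/py_coding | constructTree.py | getLRIn
-- ===== SOURCE A (Python) =====
-- def getLRIn(Inorder,root):
-- 	L_In = []
-- 	R_In = []
-- 	seenRoot = False
-- 	for i in Inorder:
-- 		if i!=root and not seenRoot:
-- 			L_In.append(i)
-- 		elif i!=root and seenRoot:
-- 			R_In.append(i)
-- 		elif i==root:
-- 			seenRoot = True
-- 	return L_In,R_In
-- ===== SOURCE B (Python) =====
-- def getLRIn(Inorder, root):
--     try:
--         idx = list(Inorder).index(root)
--     except ValueError:
--         return list(Inorder), []
--     L_In = list(Inorder[:idx])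
--     R_In = [x for x in Inorder[idx + 1:] if x != root]
--     return L_In, R_In
-- ===== Notes on version B (the rewrite author's own statement) =====
-- stated objective: alternative
-- what changed: Replaces the flag-driven single scan with a split-point decomposition: find the first index of root once (list.index in try/except), then take the prefix slice as the left part and filter root out of the suffix slice for the right part.
import Mathlib
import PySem

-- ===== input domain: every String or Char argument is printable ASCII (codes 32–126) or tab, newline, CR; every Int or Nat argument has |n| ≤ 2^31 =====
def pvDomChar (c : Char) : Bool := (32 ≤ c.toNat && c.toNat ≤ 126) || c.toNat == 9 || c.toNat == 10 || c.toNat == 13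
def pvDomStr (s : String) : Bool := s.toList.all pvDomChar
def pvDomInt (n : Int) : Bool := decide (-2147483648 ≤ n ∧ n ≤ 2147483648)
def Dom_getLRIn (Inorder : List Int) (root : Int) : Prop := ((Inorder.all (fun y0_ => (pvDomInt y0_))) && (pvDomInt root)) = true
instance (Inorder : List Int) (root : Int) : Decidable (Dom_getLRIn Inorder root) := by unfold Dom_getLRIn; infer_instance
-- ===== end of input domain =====

-- B replaces A's seenRoot-flag scan by a split-point decomposition (index once, then two slices); same cost, different shape.

-- ===== PORT A =====
-- one step of A's loop body, on state (L_In, R_In, seenRoot)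
def getLRInStep (root : Int) (st : List Int × List Int × Bool) (i : Int) : List Int × List Int × Bool :=
  if i != root && !st.2.2 then (st.1 ++ [i], st.2.1, st.2.2)
  else if i != root && st.2.2 then (st.1, st.2.1 ++ [i], st.2.2)
  else if i == root then (st.1, st.2.1, true)
  else st

def getLRIn (Inorder : List Int) (root : Int) : List Int × List Int :=
  let s := Inorder.foldl (getLRInStep root) ([], [], false)
  (s.1, s.2.1)

-- ===== PORT B =====
def getLRIn_alt (Inorder : List Int) (root : Int) : List Int × List Int :=
  match PySem.List.index? Inorder root with
  | none => (Inorder, [])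
  | some idx =>
      (PySem.List.slice Inorder none (some (idx : Int)),
       (PySem.List.slice Inorder (some ((idx : Int) + 1)) none).filter (fun x => x != root))

-- ===== PRECONDITION & SPEC =====
def Spec_getLRIn (Inorder : List Int) (root : Int) (out : List Int × List Int) : Prop := out = getLRIn_alt Inorder root
instance (Inorder : List Int) (root : Int) (out : List Int × List Int) : Decidable (Spec_getLRIn Inorder root out) := by unfold Spec_getLRIn; infer_instance

-- ===== CLAIM (what is proved, stated in full; the proofs are below) =====
def Claim_equal_getLRIn : Prop := ∀ (Inorder : List Int) (root : Int), Dom_getLRIn Inorder root → Spec_getLRIn Inorder root (getLRIn Inorder root)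

-- ===== LEMMAS AND PROOFS =====

-- after the root has been seen, the loop just filters root out into R_In
theorem getLRIn_fold_seen (root : Int) (l : List Int) (L R : List Int) :
    l.foldl (getLRInStep root) (L, R, true) = (L, R ++ l.filter (fun x => x != root), true) := by
  induction l generalizing R with
  | nil => simp
  | cons x xs ih =>
      by_cases hx : x = root
      · subst hx; simp [getLRInStep, ih]
      · simp [getLRInStep, hx, ih]

-- before the root has been seen, the loop's result is determined by the first index of root
theorem getLRIn_fold_unseen (root : Int) (l : List Int) (L R : List Int) :
    l.foldl (getLRInStep root) (L, R, false) =
      match PySem.List.index? l root with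
      | none => (L ++ l, R, false)
      | some k => (L ++ l.take k, R ++ (l.drop (k + 1)).filter (fun x => x != root), true) := by
  induction l generalizing L with
  | nil => simp
  | cons x xs ih =>
      by_cases hx : x = root
      · subst hx
        rw [PySem.List.index?_cons_self]
        simp [getLRInStep, getLRIn_fold_seen]
      · rw [PySem.List.index?_cons_of_ne xs hx]
        have hstep : getLRInStep root (L, R, false) x = (L ++ [x], R, false) := by
          simp [getLRInStep, hx]
        rw [List.foldl_cons, hstep, ih]
        cases h : PySem.List.index? xs root with
        | none => simp
        | some k => simp

theorem getLRIn_eq_alt (Inorder : List Int) (root : Int) :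
    getLRIn Inorder root = getLRIn_alt Inorder root := by
  unfold getLRIn getLRIn_alt
  rw [getLRIn_fold_unseen]
  cases h : PySem.List.index? Inorder root with
  | none => simp
  | some k =>
      have h1 : PySem.List.slice Inorder none (some (k : Int)) = Inorder.take k :=
        PySem.List.slice_to_natCast Inorder k
      have h2 : PySem.List.slice Inorder (some ((k : Int) + 1)) none = Inorder.drop (k + 1) := by
        have := PySem.List.slice_from_natCast Inorder (k + 1)
        simpa using this
      simp [h1, h2]

-- ===== VERDICT (by name: the statement is the Claim_ definition above) =====
theorem getLRIn_spec : Claim_equal_getLRIn := by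
  intro Inorder root _
  unfold Spec_getLRIn
  exact getLRIn_eq_alt Inorder root
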